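-- pv_equiv track=rewrite | github.com/JackKnifeAI/displaylink-immutable-fix | voice_snapshot_20251130_004812/astraeus_voice.py | extract_speakable_lines
-- ===== SOURCE A (Python) =====
-- from typing import Any, Dict, List, Optional
--
-- def extract_speakable_lines(answer: str) -> List[str]:
--     """Extract key lines from answer for TTS."""
--     lines = answer.splitlines()
--     speak: List[str] = []
--     in_summary = False
--
--     for ln in lines:
--         stripped = ln.strip()
--         if stripped.startswith("SUMMARY:"):
--             in_summary = True
--             speak.append(stripped)
--             continue
--         if stripped.startswith("Recovery Complete:"):
--             in_summary = True
--             speak.append(stripped)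
--             continue
--         if in_summary:
--             speak.append(stripped)
--             continue
--         if stripped.startswith("* "):
--             speak.append(stripped)
--
--     # If no structured content, speak first few lines
--     if not speak and lines:
--         for line in lines:
--             if line.strip():
--                 speak.append(line.strip())
--                 if sum(len(s) for s in speak) > 500:
--                     break
--
--     return speak
-- ===== SOURCE B (Python) =====
-- def extract_speakable_lines(answer: str):
--     """Extract key lines from answer for TTS (marker-index decomposition)."""
--     lines = answer.splitlines()
--     stripped = [ln.strip() for ln in lines]
--     marker = next((i for i, s in enumerate(stripped)
--                    if s.startswith("SUMMARY:") or s.startswith("Recovery Complete:")),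
--                   None)
--     if marker is None:
--         speak = [s for s in stripped if s.startswith("* ")]
--     else:
--         speak = [s for s in stripped[:marker] if s.startswith("* ")] + stripped[marker:]
--     if not speak and lines:
--         total = 0
--         for s in stripped:
--             if s:
--                 speak.append(s)
--                 total += len(s)
--                 if total > 500:
--                     break
--     return speak
-- ===== Notes on version B (the rewrite author's own statement) =====
-- stated objective: simpler
-- what changed: A's stateful in_summary flag loop is replaced by a one-pass search for the index of the first summary-marker line, then a filter of bullet lines before it plus all stripped lines from it on; the fallback keeps a running total instead of re-summing the accumulated list on every append.
import Mathlib
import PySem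

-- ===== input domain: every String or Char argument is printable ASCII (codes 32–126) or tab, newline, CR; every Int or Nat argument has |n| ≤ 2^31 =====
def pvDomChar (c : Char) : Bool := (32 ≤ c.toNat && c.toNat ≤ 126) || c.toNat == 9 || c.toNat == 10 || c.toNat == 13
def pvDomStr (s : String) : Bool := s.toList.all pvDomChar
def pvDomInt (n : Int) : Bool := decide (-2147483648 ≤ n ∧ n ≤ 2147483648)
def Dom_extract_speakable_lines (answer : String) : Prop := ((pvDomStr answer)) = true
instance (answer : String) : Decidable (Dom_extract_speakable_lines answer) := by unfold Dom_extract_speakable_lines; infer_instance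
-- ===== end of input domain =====

-- B replaces A's stateful in_summary flag by a one-pass marker-index search plus take/filter/drop (same cost, simpler decomposition).

-- ===== PORT A =====
-- A's for-loop over lines with (speak, in_summary) state, as structural recursion
def loopA : List String → List String → Bool → List String
  | [], speak, _ => speak
  | ln :: rest, speak, insum =>
    if PySem.Str.startswith (PySem.Str.strip ln) "SUMMARY:" then
      loopA rest (speak ++ [PySem.Str.strip ln]) true
    else if PySem.Str.startswith (PySem.Str.strip ln) "Recovery Complete:" then
      loopA rest (speak ++ [PySem.Str.strip ln]) true
    else if insum then
      loopA rest (speak ++ [PySem.Str.strip ln]) insum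
    else if PySem.Str.startswith (PySem.Str.strip ln) "* " then
      loopA rest (speak ++ [PySem.Str.strip ln]) insum
    else loopA rest speak insum

-- A's fallback loop: append each non-blank stripped line, break after the recomputed total exceeds 500
def fallbackA : List String → List String → List String
  | [], speak => speak
  | ln :: rest, speak =>
    if PySem.Str.strip ln ≠ "" then
      if (((speak ++ [PySem.Str.strip ln]).map (fun s => PySem.Str.len s)).sum) > 500 then
        speak ++ [PySem.Str.strip ln]
      else fallbackA rest (speak ++ [PySem.Str.strip ln])
    else fallbackA rest speak

def extract_speakable_lines (answer : String) : List String :=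
  let lines := PySem.Str.splitlines answer
  let speak := loopA lines [] false
  if speak.isEmpty && !lines.isEmpty then fallbackA lines [] else speak

-- ===== PORT B =====
def isMarkerB (s : String) : Bool :=
  PySem.Str.startswith s "SUMMARY:" || PySem.Str.startswith s "Recovery Complete:"

-- B's fallback loop with a running total
def fallbackB : List String → List String → Int → List String
  | [], speak, _ => speak
  | s :: rest, speak, total =>
    if s ≠ "" then
      if total + PySem.Str.len s > 500 then speak ++ [s]
      else fallbackB rest (speak ++ [s]) (total + PySem.Str.len s)
    else fallbackB rest speak total

def extract_speakable_lines_alt (answer : String) : List String :=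
  let lines := PySem.Str.splitlines answer
  let stripped := lines.map PySem.Str.strip
  let speak :=
    match stripped.findIdx? isMarkerB with
    | none => stripped.filter (fun s => PySem.Str.startswith s "* ")
    | some i => (stripped.take i).filter (fun s => PySem.Str.startswith s "* ") ++ stripped.drop i
  if speak.isEmpty && !lines.isEmpty then fallbackB stripped [] 0 else speak

-- ===== PRECONDITION & SPEC =====
def Spec_extract_speakable_lines (answer : String) (out : List String) : Prop := out = extract_speakable_lines_alt answer
instance (answer : String) (out : List String) : Decidable (Spec_extract_speakable_lines answer out) := by unfold Spec_extract_speakable_lines; infer_instance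

-- ===== CLAIM (what is proved, stated in full; the proofs are below) =====
def Claim_equal_extract_speakable_lines : Prop := ∀ (answer : String), Dom_extract_speakable_lines answer → Spec_extract_speakable_lines answer (extract_speakable_lines answer)

-- ===== LEMMAS AND PROOFS =====

theorem bfalse_not {b : Bool} (h : b = false) : ¬ (b = true) := by simp [h]

-- loopA's accumulator prepends
theorem loopA_acc (lines : List String) (speak : List String) (insum : Bool) :
    loopA lines speak insum = speak ++ loopA lines [] insum := by
  induction lines generalizing speak insum with
  | nil => simp [loopA]
  | cons ln rest ih =>
    simp only [loopA]
    split_ifs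
    all_goals (conv_rhs => rw [ih])
    all_goals rw [ih]
    all_goals simp
  
-- once in_summary is set, everything is appended stripped
theorem loopA_true (lines : List String) :
    loopA lines [] true = lines.map PySem.Str.strip := by
  induction lines with
  | nil => simp [loopA]
  | cons ln rest ih =>
    simp only [loopA, List.map_cons]
    split_ifs
    all_goals rw [loopA_acc, ih]
    all_goals simp

theorem loopA_cons_marker (ln : String) (rest : List String)
    (hm : isMarkerB (PySem.Str.strip ln) = true) :
    loopA (ln :: rest) [] false = PySem.Str.strip ln :: rest.map PySem.Str.strip := by
  simp only [loopA]
  by_cases h1 : PySem.Str.startswith (PySem.Str.strip ln) "SUMMARY:" = true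
  · rw [if_pos h1, loopA_acc, loopA_true]; simp
  · have h2 : PySem.Str.startswith (PySem.Str.strip ln) "Recovery Complete:" = true := by
      unfold isMarkerB at hm
      rcases Bool.or_eq_true_iff.mp hm with h | h
      · exact absurd h h1
      · exact h
    rw [if_neg h1, if_pos h2, loopA_acc, loopA_true]; simp

theorem loopA_cons_nonmarker (ln : String) (rest : List String)
    (hm : isMarkerB (PySem.Str.strip ln) = false) :
    loopA (ln :: rest) [] false =
      (if PySem.Str.startswith (PySem.Str.strip ln) "* " = true then [PySem.Str.strip ln] else [])
        ++ loopA rest [] false := by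
  have h1 : PySem.Str.startswith (PySem.Str.strip ln) "SUMMARY:" = false := by
    unfold isMarkerB at hm; exact (Bool.or_eq_false_iff.mp hm).1
  have h2 : PySem.Str.startswith (PySem.Str.strip ln) "Recovery Complete:" = false := by
    unfold isMarkerB at hm; exact (Bool.or_eq_false_iff.mp hm).2
  simp only [loopA]
  rw [if_neg (bfalse_not h1), if_neg (bfalse_not h2), if_neg (bfalse_not rfl)]
  by_cases h4 : PySem.Str.startswith (PySem.Str.strip ln) "* " = true
  · rw [if_pos h4, if_pos h4, loopA_acc]; simp
  · rw [if_neg h4, if_neg h4]; simp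

-- characterisation of A's main loop as B's marker-index construction
theorem loopA_false (lines : List String) :
    loopA lines [] false =
      (match (lines.map PySem.Str.strip).findIdx? isMarkerB with
      | none => (lines.map PySem.Str.strip).filter (fun s => PySem.Str.startswith s "* ")
      | some i => ((lines.map PySem.Str.strip).take i).filter (fun s => PySem.Str.startswith s "* ")
          ++ (lines.map PySem.Str.strip).drop i) := by
  induction lines with
  | nil => simp [loopA]
  | cons ln rest ih =>
    by_cases hm : isMarkerB (PySem.Str.strip ln) = true
    · rw [loopA_cons_marker ln rest hm]
      simp only [List.map_cons, List.findIdx?_cons, hm]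
      simp
    · have hm' : isMarkerB (PySem.Str.strip ln) = false := by
        cases h : isMarkerB (PySem.Str.strip ln)
        · rfl
        · exact absurd h hm
      rw [loopA_cons_nonmarker ln rest hm', ih]
      simp only [List.map_cons, List.findIdx?_cons, hm']
      cases hfi : (rest.map PySem.Str.strip).findIdx? isMarkerB with
      | none =>
        simp only [PySem.Str.startswith_eq, List.filter_cons]
        split_ifs <;> simp_all
      | some i =>
        simp only [PySem.Str.startswith_eq, List.filter_cons]
        split_ifs <;> simp_all

-- the two fallback loops agree (running total = recomputed sum)
theorem fallback_eq (lines : List String) (speak : List String) :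
    fallbackA lines speak
      = fallbackB (lines.map PySem.Str.strip) speak ((speak.map (fun s => PySem.Str.len s)).sum) := by
  induction lines generalizing speak with
  | nil => simp [fallbackA, fallbackB]
  | cons ln rest ih =>
    simp only [fallbackA, List.map_cons, fallbackB]
    have hsum : ((speak ++ [PySem.Str.strip ln]).map (fun s => PySem.Str.len s)).sum
        = (speak.map (fun s => PySem.Str.len s)).sum + PySem.Str.len (PySem.Str.strip ln) := by
      simp only [List.map_append, List.map_cons, List.map_nil, List.sum_append, List.sum_cons,
        List.sum_nil, add_zero]
    rw [hsum]
    split_ifs with h h2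
    · rfl
    · rw [ih, hsum]
    · exact ih speak

-- ===== VERDICT (by name: the statement is the Claim_ definition above) =====
theorem extract_speakable_lines_spec : Claim_equal_extract_speakable_lines := by
  intro answer _
  unfold Spec_extract_speakable_lines extract_speakable_lines extract_speakable_lines_alt
  simp only
  rw [loopA_false]
  have hf := fallback_eq (PySem.Str.splitlines answer) []
  simp only [List.map_nil, List.sum_nil] at hf
  rw [hf]
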